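-- pv_equiv track=rewrite | github.com/AMOOOMA/stocktwits-svm-nlp | data-scrapper.py | make_dict_from_list
-- ===== SOURCE A (Python) =====
-- from enum import Enum
--
-- class Label(Enum):
--     NO_LABEL = "NO_LABEL"
--     NEG_LABEL = "Bearish"
--     POS_LABEL = "Bullish"
--
-- def make_dict_from_list(messages_list):
--     """
--     # return a dict of the string list
--     # the string list will follow the format of parse_json()
--     # the dict should be like {label} : {array of messages}
--     """
--     label_dict = {}
--     NO_LABEL_list = []
--     bullish_list = []
--     bearish_list = []
--
--     for item in messages_list:
--         label, message = list(item.items())[0]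
--         if label == Label.NO_LABEL:
--             NO_LABEL_list.append(message)
--         elif label == Label.NEG_LABEL.value:
--             bearish_list.append(message)
--         elif label == Label.POS_LABEL.value:
--             bullish_list.append(message)
--
--     label_dict[Label.NO_LABEL.value] = NO_LABEL_list
--     label_dict[Label.NEG_LABEL.value] = bearish_list
--     label_dict[Label.POS_LABEL.value] = bullish_list
--
--     return label_dict
-- ===== SOURCE B (Python) =====
-- from enum import Enum
--
-- class Label(Enum):
--     NO_LABEL = "NO_LABEL"
--     NEG_LABEL = "Bearish"
--     POS_LABEL = "Bullish"
--
-- def make_dict_from_list(messages_list):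
--     # extract the first (label, message) pair of each item once,
--     # then build each bucket with its own filtering pass
--     # (NO_LABEL is compared against the enum member, exactly as upstream does)
--     pairs = [next(iter(item.items())) for item in messages_list]
--     return {
--         Label.NO_LABEL.value: [m for (l, m) in pairs if l == Label.NO_LABEL],
--         Label.NEG_LABEL.value: [m for (l, m) in pairs if l == Label.NEG_LABEL.value],
--         Label.POS_LABEL.value: [m for (l, m) in pairs if l == Label.POS_LABEL.value],
--     }
-- ===== Notes on version B (the rewrite author's own statement) =====
-- stated objective: simpler
-- what changed: A's single loop with if/elif accumulator lists is replaced by extracting all first (label,message) pairs once and building each of the three buckets with its own filtering comprehension, preserving A's comparison of the label against the Label.NO_LABEL enum member for the first bucket.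
import Mathlib
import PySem

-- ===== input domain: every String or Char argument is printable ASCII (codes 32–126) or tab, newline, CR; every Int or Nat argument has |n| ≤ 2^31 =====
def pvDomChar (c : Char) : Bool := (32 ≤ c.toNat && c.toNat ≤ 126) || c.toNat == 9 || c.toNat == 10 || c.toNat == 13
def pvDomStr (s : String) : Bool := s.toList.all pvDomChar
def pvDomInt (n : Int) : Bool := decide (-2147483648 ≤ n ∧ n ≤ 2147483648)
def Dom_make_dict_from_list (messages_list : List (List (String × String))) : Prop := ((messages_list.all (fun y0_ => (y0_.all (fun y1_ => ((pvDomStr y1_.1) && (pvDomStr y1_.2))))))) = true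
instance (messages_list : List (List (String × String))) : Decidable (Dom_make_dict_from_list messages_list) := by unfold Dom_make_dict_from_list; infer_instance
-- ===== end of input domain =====

-- B groups with three filtering passes over the once-extracted first pairs instead of A's
-- single if/elif accumulation loop (same cost, plainer decomposition).

-- ===== PORT A =====
inductive PyLabel | NO_LABEL | NEG_LABEL | POS_LABEL
deriving DecidableEq, Repr

def PyLabel.val : PyLabel → String
  | .NO_LABEL => "NO_LABEL"
  | .NEG_LABEL => "Bearish"
  | .POS_LABEL => "Bullish"

-- Python `str == <Enum member>` has no cross-type __eq__, so it is always False; exact port.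
def pyEqStrLabel (_s : String) (_l : PyLabel) : Bool := false

-- the body of A's for-loop, one step of the accumulation
def aStep (acc : List String × List String × List String) (item : List (String × String)) :
    List String × List String × List String :=
  match item with
  | [] => acc  -- unreachable under Pre_ (Python raises IndexError on an empty dict)
  | (label, message) :: _ =>
    if pyEqStrLabel label PyLabel.NO_LABEL then (acc.1 ++ [message], acc.2.1, acc.2.2)
    else if label == PyLabel.NEG_LABEL.val then (acc.1, acc.2.1 ++ [message], acc.2.2)
    else if label == PyLabel.POS_LABEL.val then (acc.1, acc.2.1, acc.2.2 ++ [message])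
    else acc

def make_dict_from_list (messages_list : List (List (String × String))) : List (String × List String) :=
  let st := messages_list.foldl aStep ([], [], [])
  [(PyLabel.NO_LABEL.val, st.1), (PyLabel.NEG_LABEL.val, st.2.1), (PyLabel.POS_LABEL.val, st.2.2)]

-- ===== PORT B =====
def make_dict_from_list_alt (messages_list : List (List (String × String))) : List (String × List String) :=
  let pairs := messages_list.filterMap List.head?  -- next(iter(item.items())) for each item
  [ (PyLabel.NO_LABEL.val, (pairs.filter (fun p => pyEqStrLabel p.1 PyLabel.NO_LABEL)).map Prod.snd),
    (PyLabel.NEG_LABEL.val, (pairs.filter (fun p => p.1 == PyLabel.NEG_LABEL.val)).map Prod.snd),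
    (PyLabel.POS_LABEL.val, (pairs.filter (fun p => p.1 == PyLabel.POS_LABEL.val)).map Prod.snd) ]

-- ===== PRECONDITION & SPEC =====
-- Pre_ excludes items that are empty dicts: there `list(item.items())[0]` raises IndexError in A
-- (and B's `next(iter(item.items()))` raises StopIteration).
def Pre_make_dict_from_list (messages_list : List (List (String × String))) : Prop :=
  ∀ item ∈ messages_list, item ≠ []
instance (messages_list : List (List (String × String))) : Decidable (Pre_make_dict_from_list messages_list) := by unfold Pre_make_dict_from_list; infer_instance
def pvWitness_make_dict_from_list : (List (List (String × String))) := [[("Bearish", "msg")]]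

def Spec_make_dict_from_list (messages_list : List (List (String × String))) (out : List (String × List String)) : Prop := out = make_dict_from_list_alt messages_list
instance (messages_list : List (List (String × String))) (out : List (String × List String)) : Decidable (Spec_make_dict_from_list messages_list out) := by unfold Spec_make_dict_from_list; infer_instance

-- ===== CLAIM (what is proved, stated in full; the proofs are below) =====
def Claim_equal_make_dict_from_list : Prop := ∀ (messages_list : List (List (String × String))), Dom_make_dict_from_list messages_list → Pre_make_dict_from_list messages_list → Spec_make_dict_from_list messages_list (make_dict_from_list messages_list)

-- ===== LEMMAS AND PROOFS =====

-- A's fold, characterised: the NO_LABEL accumulator never grows (the comparison is always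
-- False), the other two collect the same filtered first pairs as B.
theorem fold_char (xs : List (List (String × String))) (n b u : List String) :
    xs.foldl aStep (n, b, u)
    = (n,
       b ++ ((xs.filterMap List.head?).filter (fun p => p.1 == "Bearish")).map Prod.snd,
       u ++ ((xs.filterMap List.head?).filter (fun p => p.1 == "Bullish")).map Prod.snd) := by
  induction xs generalizing n b u with
  | nil => simp
  | cons x xs ih =>
    rw [List.foldl_cons]
    match x with
    | [] =>
      rw [show aStep (n, b, u) [] = (n, b, u) from rfl, ih]
      simp
    | (label, message) :: rest =>
      by_cases hb : label = "Bearish"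
      · subst hb
        rw [show aStep (n, b, u) (("Bearish", message) :: rest) = (n, b ++ [message], u) from by
          simp [aStep, pyEqStrLabel, PyLabel.val], ih]
        simp
      · by_cases hu : label = "Bullish"
        · subst hu
          rw [show aStep (n, b, u) (("Bullish", message) :: rest) = (n, b, u ++ [message]) from by
            simp [aStep, pyEqStrLabel, PyLabel.val], ih]
          simp
        · rw [show aStep (n, b, u) ((label, message) :: rest) = (n, b, u) from by
            simp [aStep, pyEqStrLabel, PyLabel.val, hb, hu], ih]
          simp [hb, hu]

-- ===== VERDICT (by name: the statement is the Claim_ definition above) =====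
theorem make_dict_from_list_spec : Claim_equal_make_dict_from_list := by
  intro messages_list _ _
  show make_dict_from_list messages_list = make_dict_from_list_alt messages_list
  simp [make_dict_from_list, make_dict_from_list_alt, fold_char, pyEqStrLabel, PyLabel.val]
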